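-- pv_equiv track=rewrite | github.com/rishikanaujia/renewable_rankings | research_integration/parsers/base_parser.py | _find_all_metrics
-- ===== SOURCE A (Python) =====
-- from typing import Dict, Any, List, Optional
--
-- def _find_all_metrics(
--
--     metrics: List[Dict[str, Any]],
--     keywords: List[str],
--     case_insensitive: bool = True
-- ) -> List[Dict[str, Any]]:
--     """Find all metrics matching any of the keywords.
--
--     Args:
--         metrics: List of metric dictionaries
--         keywords: Keywords to search for in metric names
--         case_insensitive: Whether to ignore case in search
--
--     Returns:
--         List of matching metric dictionaries
--     """
--     matches = []
--
--     for metric in metrics: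
--         if not isinstance(metric, dict):
--             continue
--
--         metric_name = metric.get('metric', '')
--         if case_insensitive:
--             metric_name = metric_name.lower()
--             search_keywords = [kw.lower() for kw in keywords]
--         else:
--             search_keywords = keywords
--
--         if any(kw in metric_name for kw in search_keywords):
--             matches.append(metric)
--
--     return matches
-- ===== SOURCE B (Python) =====
-- from typing import Dict, Any, List
--
-- def _find_all_metrics(
--     metrics: List[Dict[str, Any]],
--     keywords: List[str],
--     case_insensitive: bool = True
-- ) -> List[Dict[str, Any]]:
--     """Keyword-outer strategy: build the (case-folded) name table once, then
--     sweep it once per keyword, or-ing that keyword's matches into a flag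
--     vector; finally emit the metrics whose flag is set."""
--     names = [(m.get('metric', '').lower() if case_insensitive else m.get('metric', ''))
--              if isinstance(m, dict) else None
--              for m in metrics]
--     matched = [False] * len(metrics)
--     for kw in keywords:
--         k = kw.lower() if case_insensitive else kw
--         matched = [f or (nm is not None and k in nm) for f, nm in zip(matched, names)]
--     return [m for m, f in zip(metrics, matched) if f]
-- ===== Notes on version B (the rewrite author's own statement) =====
-- stated objective: alternative
-- what changed: B inverts the loop nesting: instead of scanning the keyword list for every metric, it precomputes the folded name table once, then iterates keywords in the OUTER loop, or-ing each keyword's matches into a boolean flag vector over the metrics, and finally filters by the flags; keyword lowercasing happens once per keyword instead of once per metric.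
import Mathlib
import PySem

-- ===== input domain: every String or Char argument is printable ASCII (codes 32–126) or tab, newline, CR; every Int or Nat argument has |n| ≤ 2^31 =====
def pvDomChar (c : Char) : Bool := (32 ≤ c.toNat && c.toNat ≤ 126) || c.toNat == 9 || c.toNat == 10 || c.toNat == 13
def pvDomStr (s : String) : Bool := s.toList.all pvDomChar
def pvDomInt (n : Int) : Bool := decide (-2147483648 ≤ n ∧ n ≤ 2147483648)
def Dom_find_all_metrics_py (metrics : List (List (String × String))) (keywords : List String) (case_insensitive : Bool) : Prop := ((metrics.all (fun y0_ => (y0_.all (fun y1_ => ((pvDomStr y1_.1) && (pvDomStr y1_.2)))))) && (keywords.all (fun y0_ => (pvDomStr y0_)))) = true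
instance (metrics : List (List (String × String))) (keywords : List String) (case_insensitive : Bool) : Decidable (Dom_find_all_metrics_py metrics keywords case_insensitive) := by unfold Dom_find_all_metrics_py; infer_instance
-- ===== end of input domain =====

-- B inverts the loop nesting: keywords become the outer loop, or-ing each keyword's matches into a flag vector over a precomputed folded name table, then filtering by the flags (alternative decomposition, same cost).
-- ===== PORT A =====
def find_all_metrics_py (metrics : List (List (String × String))) (keywords : List String) (case_insensitive : Bool) : List (List (String × String)) :=
  metrics.foldl (fun acc metric =>
    -- isinstance(metric, dict) is always true under the type convention
    let metric_name := (PySem.Dict.mk metric).getD "metric" ""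
    let metric_name := if case_insensitive then PySem.Str.lower metric_name else metric_name
    let search_keywords := if case_insensitive then keywords.map PySem.Str.lower else keywords
    if search_keywords.any (fun kw => PySem.Str.isIn kw metric_name) then acc ++ [metric] else acc) []

-- ===== PORT B =====
def find_all_metrics_py_alt (metrics : List (List (String × String))) (keywords : List String) (case_insensitive : Bool) : List (List (String × String)) :=
  -- isinstance(m, dict) is always true under the type convention, so every name is present
  let names := metrics.map (fun m =>
    let nm := (PySem.Dict.mk m).getD "metric" ""
    if case_insensitive then PySem.Str.lower nm else nm)
  let matched := keywords.foldl (fun (matched : List Bool) kw =>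
      let k := if case_insensitive then PySem.Str.lower kw else kw
      (matched.zip names).map (fun p => p.1 || PySem.Str.isIn k p.2))
    (List.replicate metrics.length false)
  ((metrics.zip matched).filter (fun p => p.2)).map (fun p => p.1)

-- ===== PRECONDITION & SPEC =====
def Spec_find_all_metrics_py (metrics : List (List (String × String))) (keywords : List String) (case_insensitive : Bool) (out : List (List (String × String))) : Prop := out = find_all_metrics_py_alt metrics keywords case_insensitive
instance (metrics : List (List (String × String))) (keywords : List String) (case_insensitive : Bool) (out : List (List (String × String))) : Decidable (Spec_find_all_metrics_py metrics keywords case_insensitive out) := by unfold Spec_find_all_metrics_py; infer_instance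

-- ===== CLAIM (what is proved, stated in full; the proofs are below) =====
def Claim_equal_find_all_metrics_py : Prop := ∀ (metrics : List (List (String × String))) (keywords : List String) (case_insensitive : Bool), Dom_find_all_metrics_py metrics keywords case_insensitive → Spec_find_all_metrics_py metrics keywords case_insensitive (find_all_metrics_py metrics keywords case_insensitive)

-- ===== LEMMAS AND PROOFS =====

-- one keyword sweep over the name table, written as map-over-zip, ors that keyword's match into each flag
theorem sweep_step (q : String → Bool) (names : List String) (g : String → Bool) :
    ((names.map g).zip names).map (fun p => p.1 || q p.2)
      = names.map (fun nm => g nm || q nm) := by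
  induction names with
  | nil => rfl
  | cons nm ns ih => simp [ih]

-- the fold over keywords turns the flag vector into the pointwise 'any keyword matches'
theorem sweep_fold (q : String → String → Bool) (kws : List String) (names : List String)
    (g : String → Bool) :
    kws.foldl (fun matched kw => (matched.zip names).map (fun p => p.1 || q kw p.2))
      (names.map g)
      = names.map (fun nm => g nm || kws.any (fun kw => q kw nm)) := by
  induction kws generalizing g with
  | nil => simp
  | cons kw kws ih =>
    simp only [List.foldl_cons, sweep_step]
    rw [ih (fun nm => g nm || q kw nm)]
    simp [Bool.or_assoc]

-- filtering (metrics zip flags) by the flag, when the flag is a function of the metric, is a plain filter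
theorem zip_map_filter {α : Type} (h : α → Bool) (ms : List α) :
    ((ms.zip (ms.map h)).filter (fun p => p.2)).map (fun p => p.1) = ms.filter h := by
  induction ms with
  | nil => rfl
  | cons m ms ih =>
    by_cases hm : h m = true <;> simp [hm, ih]

-- ===== VERDICT (by name: the statement is the Claim_ definition above) =====
theorem find_all_metrics_py_spec : Claim_equal_find_all_metrics_py := by
  intro metrics keywords case_insensitive _
  unfold Spec_find_all_metrics_py
  simp only [find_all_metrics_py, find_all_metrics_py_alt]
  rw [PySem.List.foldl_append_if_eq_filter, List.nil_append]
  have hrep : List.replicate metrics.length false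
      = (metrics.map (fun m =>
          let nm := (PySem.Dict.mk m).getD "metric" ""
          if case_insensitive then PySem.Str.lower nm else nm)).map (fun _ => false) := by
    simp
  rw [hrep,
      sweep_fold (fun kw nm => PySem.Str.isIn (if case_insensitive then PySem.Str.lower kw else kw) nm),
      List.map_map, zip_map_filter]
  exact (List.filter_congr (fun m _ => by cases case_insensitive <;> simp [List.any_map, Function.comp_def, PySem.Str.isIn, PySem.Str.toList_lower])).symm
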